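-- pv_equiv track=rewrite | github.com/DongYun666/leetcode | 1713.得到子序列的最少操作次数.py | minOperations2
-- ===== SOURCE A (Python) =====
-- import bisect
-- from typing import List
--
-- def minOperations2(target: List[int], arr: List[int]) -> int:
--     # 记录target索引编号
--     m = len(target)
--     dct = dict()
--     for i in range(m):
--         dct[target[i]] = i
--     # 映射arr成索引编号寻找最长递增子序列
--     dp = []
--     for num in arr:
--         if num in dct:
--             i = bisect.bisect_left(dp, dct[num])
--             if i < len(dp):
--                 dp[i] = dct[num]
--             else:
--                 dp.append(dct[num])
--     return m-len(dp)
-- ===== SOURCE B (Python) =====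
-- from typing import List
--
-- def minOperations2(target: List[int], arr: List[int]) -> int:
--     # map target value -> index (last write wins), then O(k^2) DP for the
--     # longest strictly increasing subsequence of the mapped indices
--     m = len(target)
--     dct = dict()
--     for i in range(m):
--         dct[target[i]] = i
--     pairs = []  # (mapped index, LIS length ending here)
--     best = 0
--     for num in arr:
--         if num in dct:
--             v = dct[num]
--             cur = 1
--             for u, l in pairs:
--                 if u < v and l + 1 > cur:
--                     cur = l + 1
--             pairs.append((v, cur))
--             if cur > best:
--                 best = cur
--     return m - best
-- ===== Notes on version B (the rewrite author's own statement) =====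
-- stated objective: alternative
-- what changed: The patience-sorting tails array maintained with bisect_left is replaced by a quadratic dynamic-programming table of (mapped index, LIS-length-ending-here) pairs with a running best, so no sorted array and no binary search are kept.
import Mathlib
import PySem

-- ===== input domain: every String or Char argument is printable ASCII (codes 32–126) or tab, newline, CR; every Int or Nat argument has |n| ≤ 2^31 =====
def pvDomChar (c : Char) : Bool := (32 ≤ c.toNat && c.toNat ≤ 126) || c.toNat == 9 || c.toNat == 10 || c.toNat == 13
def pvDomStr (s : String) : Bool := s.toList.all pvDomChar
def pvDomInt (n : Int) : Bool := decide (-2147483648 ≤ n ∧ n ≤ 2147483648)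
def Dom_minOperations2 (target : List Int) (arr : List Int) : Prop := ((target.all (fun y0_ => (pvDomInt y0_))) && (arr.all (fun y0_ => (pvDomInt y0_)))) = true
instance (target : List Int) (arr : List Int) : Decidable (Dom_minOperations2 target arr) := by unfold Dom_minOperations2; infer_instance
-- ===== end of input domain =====

-- B replaces A's patience/bisect tails array by an O(k^2) DP over (value, LIS-length) pairs:
-- a different algorithm of similar size (objective: alternative, not faster).

-- ===== PORT A =====
-- loop body of A's `for num in arr` loop: `if num in dct: i = bisect_left(dp, dct[num]); …`
def pvStepA (dct : PySem.Dict Int Int) (dp : List Int) (num : Int) : List Int :=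
  match dct.get? num with
  | none => dp
  | some v =>
    let i := PySem.List.bisectLeft dp v
    if i < dp.length then dp.set i v else dp ++ [v]

def minOperations2 (target : List Int) (arr : List Int) : Int :=
  let m := target.length
  -- for i in range(m): dct[target[i]] = i   (i always in range, so pyGetD is exact)
  let dct := (PySem.List.pyRange 0 (m : Int) 1).foldl
      (fun d i => d.insert (PySem.List.pyGetD target i 0) i) PySem.Dict.empty
  let dp := arr.foldl (pvStepA dct) []
  (m : Int) - dp.length

-- ===== PORT B =====
-- inner loop of B: cur = 1; for u, l in pairs: if u < v and l + 1 > cur: cur = l + 1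
def pvCur (pairs : List (Int × Int)) (v : Int) : Int :=
  pairs.foldl (fun cur ul => if ul.1 < v ∧ ul.2 + 1 > cur then ul.2 + 1 else cur) 1

-- loop body of B's `for num in arr` loop; state = (pairs, best)
def pvStepB (dct : PySem.Dict Int Int) (st : List (Int × Int) × Int) (num : Int) :
    List (Int × Int) × Int :=
  match dct.get? num with
  | none => st
  | some v =>
    let cur := pvCur st.1 v
    (st.1 ++ [(v, cur)], if cur > st.2 then cur else st.2)

def minOperations2_alt (target : List Int) (arr : List Int) : Int :=
  let m := target.length
  -- for i in range(m): dct[target[i]] = i   (i always in range, so pyGetD is exact)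
  let dct := (PySem.List.pyRange 0 (m : Int) 1).foldl
      (fun d i => d.insert (PySem.List.pyGetD target i 0) i) PySem.Dict.empty
  let st := arr.foldl (pvStepB dct) (([] : List (Int × Int)), (0 : Int))
  (m : Int) - st.2

-- ===== PRECONDITION & SPEC =====
def Spec_minOperations2 (target : List Int) (arr : List Int) (out : Int) : Prop := out = minOperations2_alt target arr
instance (target : List Int) (arr : List Int) (out : Int) : Decidable (Spec_minOperations2 target arr out) := by unfold Spec_minOperations2; infer_instance

-- ===== CLAIM (what is proved, stated in full; the proofs are below) =====
def Claim_equal_minOperations2 : Prop := ∀ (target : List Int) (arr : List Int), Dom_minOperations2 target arr → Spec_minOperations2 target arr (minOperations2 target arr)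

-- ===== LEMMAS AND PROOFS =====

-- number of elements of t strictly below w
def pvCnt (t : List Int) (w : Int) : Nat := t.countP (fun y => decide (y < w))

-- the effect of one patience step on a sorted tails list, written structurally
def pvIns (t : List Int) (w : Int) : List Int :=
  match t with
  | [] => [w]
  | x :: xs => if x < w then x :: pvIns xs w else w :: xs

lemma pvCnt_le (t : List Int) (w : Int) : pvCnt t w ≤ t.length :=
  List.countP_le_length

lemma pvCnt_mono (t : List Int) {v u : Int} (h : v ≤ u) : pvCnt t v ≤ pvCnt t u := by
  apply List.countP_mono_left
  intro a _ h'
  simp only [decide_eq_true_eq] at h' ⊢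
  omega

lemma pvCnt_eq_zero_of_lb {t : List Int} {x w : Int} (hlb : ∀ y ∈ t, x < y)
    (hxw : ¬ x < w) : pvCnt t w = 0 := by
  refine List.countP_eq_zero.mpr ?_
  intro a ha
  have := hlb a ha
  simp only [decide_eq_true_eq]
  omega

lemma pvCountP_eq_of_split (p : Int → Bool) :
    ∀ (xs : List Int) (i : Nat), i ≤ xs.length →
      (∀ j (hj : j < xs.length), j < i → p xs[j] = true) →
      (∀ j (hj : j < xs.length), i ≤ j → p xs[j] = false) →
      xs.countP p = i
  | [], i, hi, _, _ => by simpa using (Nat.le_zero.mp (by simpa using hi)).symm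
  | x :: xs, 0, _, _, h2 => by
    have hall : ∀ a ∈ x :: xs, ¬ p a = true := by
      intro a ha
      obtain ⟨j, hj, rfl⟩ := List.mem_iff_getElem.mp ha
      simp [h2 j hj (Nat.zero_le _)]
    simp [List.countP_eq_zero.mpr hall]
  | x :: xs, i + 1, hi, h1, h2 => by
    have hx : p x = true := by
      have := h1 0 (by simp) (by omega)
      simpa using this
    have hrec := pvCountP_eq_of_split p xs i (by simpa using hi)
      (fun j hj hji => by
        have := h1 (j + 1) (by simpa using Nat.succ_lt_succ hj) (by omega)
        simpa using this)
      (fun j hj hij => by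
        have := h2 (j + 1) (by simpa using Nat.succ_lt_succ hj) (by omega)
        simpa using this)
    simp [hx, hrec]

lemma pvBisect_eq_cnt (dp : List Int) (v : Int) (hs : dp.Pairwise (· < ·)) :
    PySem.List.bisectLeft dp v = pvCnt dp v := by
  obtain ⟨hle, hlt, hge⟩ := PySem.List.bisectLeft_spec dp v (hs.imp le_of_lt)
  exact (pvCountP_eq_of_split _ dp _ hle
    (fun j hj hji => by simpa using hlt j hj hji)
    (fun j hj hij => by simpa using not_lt.mpr (hge j hj hij))).symm

lemma pvSet_cnt_eq_ins (w : Int) :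
    ∀ (t : List Int), t.Pairwise (· < ·) →
      (if pvCnt t w < t.length then t.set (pvCnt t w) w else t ++ [w]) = pvIns t w
  | [], _ => by simp [pvCnt, pvIns]
  | x :: xs, hs => by
    obtain ⟨hlb, hxs⟩ := List.pairwise_cons.mp hs
    by_cases hxw : x < w
    · have hcnt : pvCnt (x :: xs) w = pvCnt xs w + 1 := by
        simp [pvCnt, List.countP_cons_of_pos, hxw]
      have ih := pvSet_cnt_eq_ins w xs hxs
      by_cases hlt : pvCnt xs w < xs.length
      · rw [if_pos hlt] at ih
        simp only [pvIns, if_pos hxw, hcnt, List.length_cons]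
        rw [if_pos (by omega)]
        show x :: xs.set (pvCnt xs w) w = x :: pvIns xs w
        rw [ih]
      · rw [if_neg hlt] at ih
        simp only [pvIns, if_pos hxw, hcnt, List.length_cons]
        rw [if_neg (by omega), List.cons_append, ih]
    · have hcnt : pvCnt (x :: xs) w = 0 := by
        have h0 : pvCnt xs w = 0 := pvCnt_eq_zero_of_lb hlb hxw
        simp [pvCnt, List.countP_cons_of_neg, hxw] at *
        simpa [pvCnt] using h0
      simp [pvIns, hcnt, hxw]

lemma pvStepA_eq_ins (dct : PySem.Dict Int Int) (dp : List Int) (num v : Int)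
    (hd : dct.get? num = some v) (hs : dp.Pairwise (· < ·)) :
    pvStepA dct dp num = pvIns dp v := by
  simp only [pvStepA, hd]
  rw [pvBisect_eq_cnt dp v hs]
  exact pvSet_cnt_eq_ins v dp hs

lemma pvMem_pvIns {t : List Int} {w y : Int} (h : y ∈ pvIns t w) : y ∈ t ∨ y = w := by
  induction t with
  | nil => simpa [pvIns] using h
  | cons x xs ih =>
    by_cases hxw : x < w
    · simp only [pvIns, if_pos hxw, List.mem_cons] at h
      rcases h with h | h
      · exact Or.inl (by simp [h])
      · rcases ih h with h' | h'
        · exact Or.inl (by simp [h'])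
        · exact Or.inr h'
    · simp only [pvIns, if_neg hxw, List.mem_cons] at h
      rcases h with h | h
      · exact Or.inr h
      · exact Or.inl (by simp [h])

lemma pvIns_pairwise {w : Int} :
    ∀ {t : List Int}, t.Pairwise (· < ·) → (pvIns t w).Pairwise (· < ·) := by
  intro t
  induction t with
  | nil => intro _; simp [pvIns]
  | cons x xs ih =>
    intro hs
    obtain ⟨hlb, hxs⟩ := List.pairwise_cons.mp hs
    by_cases hxw : x < w
    · simp only [pvIns, if_pos hxw]
      refine List.pairwise_cons.mpr ⟨?_, ih hxs⟩
      intro y hy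
      rcases pvMem_pvIns hy with h | h
      · exact hlb y h
      · omega
    · simp only [pvIns, if_neg hxw]
      refine List.pairwise_cons.mpr ⟨?_, hxs⟩
      intro y hy
      have := hlb y hy
      omega

lemma pvIns_length (w : Int) :
    ∀ (t : List Int), t.Pairwise (· < ·) →
      (pvIns t w).length = if pvCnt t w = t.length then t.length + 1 else t.length
  | [], _ => by simp [pvIns, pvCnt]
  | x :: xs, hs => by
    obtain ⟨hlb, hxs⟩ := List.pairwise_cons.mp hs
    by_cases hxw : x < w
    · have hcnt : pvCnt (x :: xs) w = pvCnt xs w + 1 := by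
        simp [pvCnt, List.countP_cons_of_pos, hxw]
      have ih := pvIns_length w xs hxs
      simp only [pvIns, if_pos hxw, List.length_cons, hcnt, ih]
      split_ifs <;> omega
    · have hcnt : pvCnt (x :: xs) w = 0 := by
        have h0 : pvCnt xs w = 0 := pvCnt_eq_zero_of_lb hlb hxw
        simp [pvCnt, List.countP_cons_of_neg, hxw]
        simpa [pvCnt] using h0
      simp only [pvIns, if_neg hxw, List.length_cons, hcnt]
      rw [if_neg (by omega)]

lemma pvCnt_pvIns (w u : Int) :
    ∀ (t : List Int), t.Pairwise (· < ·) →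
      pvCnt (pvIns t w) u = if w < u then max (pvCnt t u) (pvCnt t w + 1) else pvCnt t u
  | [], _ => by
    simp only [pvIns, pvCnt, List.countP_cons, List.countP_nil]
    split_ifs with h1 h2 <;> simp_all
  | x :: xs, hs => by
    obtain ⟨hlb, hxs⟩ := List.pairwise_cons.mp hs
    by_cases hxw : x < w
    · have ih := pvCnt_pvIns w u xs hxs
      simp only [pvIns, if_pos hxw, pvCnt, List.countP_cons, decide_eq_true_eq] at ih ⊢
      by_cases hwu : w < u
      · have hmono := pvCnt_mono xs (le_of_lt hwu)
        simp only [pvCnt] at hmono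
        split_ifs at ih ⊢ <;> omega
      · split_ifs at ih ⊢ <;> omega
    · have h0w' : pvCnt xs w = 0 := pvCnt_eq_zero_of_lb hlb hxw
      by_cases hxu : x < u
      · simp only [pvIns, if_neg hxw, pvCnt, List.countP_cons, decide_eq_true_eq] at h0w' ⊢
        split_ifs <;> omega
      · have h0u' : pvCnt xs u = 0 := pvCnt_eq_zero_of_lb hlb hxu
        simp only [pvIns, if_neg hxw, pvCnt, List.countP_cons, decide_eq_true_eq] at h0w' h0u' ⊢
        split_ifs <;> omega

lemma pvCur_append (pairs : List (Int × Int)) (w c u : Int) :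
    pvCur (pairs ++ [(w, c)]) u =
      if w < u ∧ c + 1 > pvCur pairs u then c + 1 else pvCur pairs u := by
  simp [pvCur, List.foldl_append]

-- the simulation invariant: dp is A's tails list, st is B's (pairs, best) state
def pvInv (dp : List Int) (st : List (Int × Int) × Int) : Prop :=
  dp.Pairwise (· < ·) ∧ st.2 = (dp.length : Int) ∧
    ∀ v : Int, pvCur st.1 v = (pvCnt dp v : Int) + 1

lemma pvInv_step (dct : PySem.Dict Int Int) (num : Int) (dp : List Int)
    (st : List (Int × Int) × Int) (h : pvInv dp st) :
    pvInv (pvStepA dct dp num) (pvStepB dct st num) := by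
  obtain ⟨hs, hb, hc⟩ := h
  cases hd : dct.get? num with
  | none => exact ⟨by simpa [pvStepA, hd] using hs,
      by simpa [pvStepA, pvStepB, hd] using hb,
      fun v => by simpa [pvStepA, pvStepB, hd] using hc v⟩
  | some v =>
    have hA : pvStepA dct dp num = pvIns dp v := pvStepA_eq_ins dct dp num v hd hs
    have hB : pvStepB dct st num =
        (st.1 ++ [(v, pvCur st.1 v)], if pvCur st.1 v > st.2 then pvCur st.1 v else st.2) := by
      simp only [pvStepB, hd]
    rw [pvInv, hA, hB]
    refine ⟨pvIns_pairwise hs, ?_, ?_⟩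
    · rw [hc v, hb, pvIns_length v dp hs]
      have := pvCnt_le dp v
      split_ifs <;> push_cast <;> omega
    · intro u
      rw [pvCur_append, hc v, hc u, pvCnt_pvIns v u dp hs]
      have hle := pvCnt_le dp v
      by_cases hvu : v < u
      · have hmono := pvCnt_mono dp (le_of_lt hvu)
        split_ifs <;> push_cast <;> omega
      · split_ifs <;> omega

lemma pvInv_foldl (dct : PySem.Dict Int Int) (nums : List Int) :
    ∀ (dp : List Int) (st : List (Int × Int) × Int), pvInv dp st →
      pvInv (nums.foldl (pvStepA dct) dp) (nums.foldl (pvStepB dct) st) := by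
  induction nums with
  | nil => intro dp st h; simpa using h
  | cons num rest ih =>
    intro dp st h
    simpa using ih _ _ (pvInv_step dct num dp st h)

-- ===== VERDICT (by name: the statement is the Claim_ definition above) =====
theorem minOperations2_spec : Claim_equal_minOperations2 := by
  unfold Claim_equal_minOperations2
  intro target arr _
  simp only [Spec_minOperations2, minOperations2, minOperations2_alt]
  have hbase : pvInv [] (([] : List (Int × Int)), (0 : Int)) :=
    ⟨List.Pairwise.nil, by simp, fun v => by simp [pvCur, pvCnt]⟩
  have h := pvInv_foldl
    ((PySem.List.pyRange 0 (target.length : Int) 1).foldl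
      (fun d i => d.insert (PySem.List.pyGetD target i 0) i) PySem.Dict.empty)
    arr [] (([] : List (Int × Int)), (0 : Int)) hbase
  obtain ⟨_, hb, _⟩ := h
  rw [hb]
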